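-- pv_equiv track=rewrite | github.com/MCSipahioglu/8-Ball-Pool | Code (Version 4)/f.py | calculate_master_ball_counts
-- ===== SOURCE A (Python) =====
-- def calculate_master_ball_counts(master_balls):
--
--     detected_ball_counts=[0,0,0,0]
--
--     for master_ball in master_balls:
--         master_ball_state=master_ball[1]
--         if master_ball_state>0:
--             master_ball_class=master_ball[0]
--
--             if master_ball_class=='C':
--                 detected_ball_counts[0]+=1
--             elif master_ball_class=='O':
--                 detected_ball_counts[1]+=1
--             elif master_ball_class=='8':
--                 detected_ball_counts[2]+=1
--             elif master_ball_class=='||':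
--                 detected_ball_counts[3]+=1
--
--     return detected_ball_counts
-- ===== SOURCE B (Python) =====
-- def calculate_master_ball_counts(master_balls):
--     return [sum(1 for b in master_balls if b[1] > 0 and b[0] == cls)
--             for cls in ('C', 'O', '8', '||')]
-- ===== Notes on version B (the rewrite author's own statement) =====
-- stated objective: simpler
-- what changed: Replaces the single mutating classification pass over a 4-slot counter list with four independent filtered counts (one rescan per class) assembled directly into the result list.
import Mathlib
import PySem

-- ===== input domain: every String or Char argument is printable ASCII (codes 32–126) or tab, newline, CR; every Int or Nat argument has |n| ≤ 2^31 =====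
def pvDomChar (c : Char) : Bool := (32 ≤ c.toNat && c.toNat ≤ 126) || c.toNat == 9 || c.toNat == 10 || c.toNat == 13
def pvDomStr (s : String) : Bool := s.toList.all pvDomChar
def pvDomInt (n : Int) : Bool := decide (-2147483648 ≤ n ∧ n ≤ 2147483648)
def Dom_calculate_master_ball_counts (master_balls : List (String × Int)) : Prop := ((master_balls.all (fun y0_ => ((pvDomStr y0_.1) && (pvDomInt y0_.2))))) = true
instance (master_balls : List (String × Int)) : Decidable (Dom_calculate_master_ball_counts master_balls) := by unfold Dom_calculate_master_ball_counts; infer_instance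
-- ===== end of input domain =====

-- B replaces A's single mutating counter pass with four independent filtered counts, one per class (objective: simpler).


-- ===== PORT A =====
-- literal port of A: one pass, maintaining the four counters of detected_ball_counts
def cmbc_step (acc : Int × Int × Int × Int) (master_ball : String × Int) : Int × Int × Int × Int :=
  let master_ball_state := master_ball.2
  if master_ball_state > 0 then
    let master_ball_class := master_ball.1
    if master_ball_class = "C" then (acc.1 + 1, acc.2.1, acc.2.2.1, acc.2.2.2)
    else if master_ball_class = "O" then (acc.1, acc.2.1 + 1, acc.2.2.1, acc.2.2.2)
    else if master_ball_class = "8" then (acc.1, acc.2.1, acc.2.2.1 + 1, acc.2.2.2)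
    else if master_ball_class = "||" then (acc.1, acc.2.1, acc.2.2.1, acc.2.2.2 + 1)
    else acc
  else acc

def calculate_master_ball_counts (master_balls : List (String × Int)) : List Int :=
  let r := master_balls.foldl cmbc_step (0, 0, 0, 0)
  [r.1, r.2.1, r.2.2.1, r.2.2.2]

-- ===== PORT B =====
-- port of B: four independent filtered counts, one per class
def cmbc_count (master_balls : List (String × Int)) (cls : String) : Int :=
  (master_balls.countP (fun b => b.2 > 0 && b.1 == cls) : Nat)

def calculate_master_ball_counts_alt (master_balls : List (String × Int)) : List Int :=
  ["C", "O", "8", "||"].map (cmbc_count master_balls)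

-- ===== PRECONDITION & SPEC =====
def Spec_calculate_master_ball_counts (master_balls : List (String × Int)) (out : List Int) : Prop := out = calculate_master_ball_counts_alt master_balls
instance (master_balls : List (String × Int)) (out : List Int) : Decidable (Spec_calculate_master_ball_counts master_balls out) := by unfold Spec_calculate_master_ball_counts; infer_instance

-- ===== CLAIM (what is proved, stated in full; the proofs are below) =====
def Claim_equal_calculate_master_ball_counts : Prop := ∀ (master_balls : List (String × Int)), Dom_calculate_master_ball_counts master_balls → Spec_calculate_master_ball_counts master_balls (calculate_master_ball_counts master_balls)

-- ===== LEMMAS AND PROOFS =====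

-- ===== VERDICT (by name: the statement is the Claim_ definition above) =====
lemma cmbc_foldl (l : List (String × Int)) (a b c d : Int) :
    l.foldl cmbc_step (a, b, c, d) =
      (a + cmbc_count l "C", b + cmbc_count l "O", c + cmbc_count l "8", d + cmbc_count l "||") := by
  induction l generalizing a b c d with
  | nil => simp [cmbc_count]
  | cons x xs ih =>
    simp only [List.foldl_cons, cmbc_step]
    split_ifs with h2 hC hO h8 hP <;>
      simp_all [ih, cmbc_count, List.countP_cons, Prod.ext_iff] <;> omega

theorem calculate_master_ball_counts_spec : Claim_equal_calculate_master_ball_counts := by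
  intro master_balls _
  unfold Spec_calculate_master_ball_counts calculate_master_ball_counts calculate_master_ball_counts_alt
  simp [cmbc_foldl]
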